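-- pv_equiv track=rewrite | github.com/jhiltonsantos/ADS-Algoritmos-IFPI | URI/uri_1124_criptografia.py | ultima_etapa
-- ===== SOURCE A (Python) =====
-- def ultima_etapa(frase):
--     metade = int(len(frase)/2)
--     soma = ''
--     for i in range(len(frase)):
--         if i >= metade:
--             soma += chr(ord(frase[i]) - 1)
--         else:
--             soma += frase[i]
--
--     return soma
-- ===== SOURCE B (Python) =====
-- def ultima_etapa(frase):
--     metade = len(frase) // 2
--     return frase[:metade] + ''.join(chr(ord(c) - 1) for c in frase[metade:])
-- ===== Notes on version B (the rewrite author's own statement) =====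
-- stated objective: simpler
-- what changed: Replaces the per-index loop with its branch and quadratic string += by a prefix/suffix decomposition: keep frase[:metade] as one slice and map chr(ord(c)-1) over frase[metade:], joined once.
import Mathlib
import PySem

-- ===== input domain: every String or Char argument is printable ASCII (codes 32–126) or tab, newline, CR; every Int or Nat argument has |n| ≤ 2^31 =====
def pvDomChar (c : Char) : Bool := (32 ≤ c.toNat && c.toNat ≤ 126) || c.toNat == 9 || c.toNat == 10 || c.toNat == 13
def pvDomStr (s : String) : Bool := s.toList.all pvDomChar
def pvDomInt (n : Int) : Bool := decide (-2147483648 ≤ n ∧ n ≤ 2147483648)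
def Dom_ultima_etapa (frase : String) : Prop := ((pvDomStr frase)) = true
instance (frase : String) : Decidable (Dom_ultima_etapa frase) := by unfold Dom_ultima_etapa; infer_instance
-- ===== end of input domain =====

-- B replaces A's per-index loop-and-branch with a prefix/suffix decomposition (slice + map); objective: simpler.


-- ===== PORT A =====
-- metade = int(len(frase)/2): len ≥ 0 so int() truncation = floor division by 2 (exact: n/2 is exact in binary floating point for n < 2^53)
-- frase[i] with i ∈ range(len(frase)) is always in range; pyGet? … |>.getD ' ' never takes the default.
def ultima_etapa (frase : String) : String :=
  let metade : Int := PySem.Int.floordiv (PySem.Str.len frase) 2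
  let soma : List Char :=
    (PySem.List.pyRange 0 (PySem.Str.len frase) 1).foldl
      (fun soma i =>
        if i ≥ metade then
          soma ++ [Char.ofNat (((PySem.Str.pyGet? frase i).getD ' ').toNat - 1)]
        else
          soma ++ [(PySem.Str.pyGet? frase i).getD ' ']) []
  String.mk soma

-- ===== PORT B =====
-- frase[:metade] = take metade, frase[metade:] = drop metade (exact: 0 ≤ metade ≤ len)
def ultima_etapa_alt (frase : String) : String :=
  let cs := frase.toList
  let metade := cs.length / 2
  String.mk (cs.take metade ++ (cs.drop metade).map (fun c => Char.ofNat (c.toNat - 1)))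

-- ===== PRECONDITION & SPEC =====
def Spec_ultima_etapa (frase : String) (out : String) : Prop := out = ultima_etapa_alt frase
instance (frase : String) (out : String) : Decidable (Spec_ultima_etapa frase out) := by unfold Spec_ultima_etapa; infer_instance

-- ===== CLAIM (what is proved, stated in full; the proofs are below) =====
def Claim_equal_ultima_etapa : Prop := ∀ (frase : String), Dom_ultima_etapa frase → Spec_ultima_etapa frase (ultima_etapa frase)

-- ===== LEMMAS AND PROOFS =====

theorem ultima_etapa_lists (cs : List Char) :
    (PySem.List.pyRange 0 (cs.length : Int) 1).foldl
      (fun soma i =>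
        if i ≥ (PySem.Int.floordiv (cs.length : Int) 2) then
          soma ++ [Char.ofNat (((PySem.List.pyGet? cs i).getD ' ').toNat - 1)]
        else
          soma ++ [(PySem.List.pyGet? cs i).getD ' ']) []
    = cs.take (cs.length / 2) ++ (cs.drop (cs.length / 2)).map (fun c => Char.ofNat (c.toNat - 1)) := by
  have hpull : ∀ (soma : List Char) (i : Int),
      (if i ≥ PySem.Int.floordiv (cs.length : Int) 2 then
          soma ++ [Char.ofNat (((PySem.List.pyGet? cs i).getD ' ').toNat - 1)]
        else soma ++ [(PySem.List.pyGet? cs i).getD ' '])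
      = soma ++ [if i ≥ PySem.Int.floordiv (cs.length : Int) 2 then
          Char.ofNat (((PySem.List.pyGet? cs i).getD ' ').toNat - 1)
        else (PySem.List.pyGet? cs i).getD ' '] := by
    intro soma i; split <;> rfl
  simp only [hpull]
  rw [PySem.List.foldl_append_singleton_eq_map, List.nil_append, PySem.List.pyRange_one]
  have hm : PySem.Int.floordiv (cs.length : Int) 2 = ((cs.length / 2 : Nat) : Int) := by
    exact_mod_cast PySem.Int.floordiv_natCast cs.length 2
  apply List.ext_getElem
  · simp [Int.toNat_natCast]
    omega
  · intro k h1 h2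
    simp only [List.getElem_map, List.getElem_range, Int.zero_add, hm]
    have hk : k < cs.length := by
      simpa [Int.toNat_natCast] using h1
    rw [PySem.List.pyGet?_natCast, List.getElem?_eq_getElem hk]
    by_cases hge : cs.length / 2 ≤ k
    · rw [if_pos (by exact_mod_cast hge)]
      rw [List.getElem_append_right (by simp; omega)]
      simp only [List.getElem_map, List.length_take, List.getElem_drop, Option.getD_some]
      have hidx : cs.length / 2 + (k - min (cs.length / 2) cs.length) = k := by omega
      have hcast : cs[cs.length / 2 + (k - min (cs.length / 2) cs.length)]'(by omega) = cs[k]'hk :=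
        getElem_congr rfl hidx (by omega)
      simp only [hcast]
    · rw [if_neg (by push_neg; exact_mod_cast Nat.lt_of_not_le hge)]
      rw [List.getElem_append_left (by simp; omega)]
      simp

-- ===== VERDICT (by name: the statement is the Claim_ definition above) =====
theorem ultima_etapa_spec : Claim_equal_ultima_etapa := by
  intro frase _
  unfold Spec_ultima_etapa ultima_etapa ultima_etapa_alt
  simp only [PySem.Str.len_eq, PySem.Str.pyGet?]
  exact congrArg String.mk (ultima_etapa_lists frase.toList)
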